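-- pv_equiv track=rewrite | github.com/DmytroPaliichuk/python-advanced-course | multitasking/gil/homework_answers/single_threading.py | get_task_order_with_pointer
-- ===== SOURCE A (Python) =====
-- from heapq import heappop, heappush
-- from typing import Iterable
--
-- def get_task_order_with_pointer(tasks: Iterable[Iterable[int]]) -> list[int]:
--     indexed_tasks = sorted(
--         (enqueue_time, processing_time, idx) for idx, (enqueue_time, processing_time) in enumerate(tasks)
--     )
--
--     result: list[int] = []
--     heap: list[tuple[int, int]] = []
--
--     current_time = 0
--     i = 0
--     total_tasks = len(indexed_tasks)
--
--     while i < total_tasks or heap: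
--         if not heap and current_time < indexed_tasks[i][0]:
--             current_time = indexed_tasks[i][0]
--
--         while i < total_tasks and indexed_tasks[i][0] <= current_time:
--             enqueue_time, processing_time, idx = indexed_tasks[i]
--             heappush(heap, (processing_time, idx))
--             i += 1
--
--         processing_time, idx = heappop(heap)
--         current_time += processing_time
--         result.append(idx)
--
--     return result
-- ===== SOURCE B (Python) =====
-- def get_task_order_with_pointer(tasks):
--     pending = [(e, p, i) for i, (e, p) in enumerate(tasks)]
--     ready = []
--     result = []
--     t = 0
--     while pending or ready:
--         if not ready:
--             t = max(t, min(x[0] for x in pending))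
--         ready += [(p, i) for (e, p, i) in pending if e <= t]
--         pending = [x for x in pending if x[0] > t]
--         best = min(ready)
--         ready.remove(best)
--         t += best[0]
--         result.append(best[1])
--     return result
-- ===== Notes on version B (the rewrite author's own statement) =====
-- stated objective: simpler
-- what changed: Drops A's pre-sort, index pointer and heapq priority queue entirely: B keeps the not-yet-admitted tasks unsorted, each round filters them against the clock into a persistent ready pool (jumping the clock to the minimum pending enqueue time when the pool is empty) and pops the pool's minimum (processing_time, idx) with Python's built-in min.
import Mathlib
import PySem

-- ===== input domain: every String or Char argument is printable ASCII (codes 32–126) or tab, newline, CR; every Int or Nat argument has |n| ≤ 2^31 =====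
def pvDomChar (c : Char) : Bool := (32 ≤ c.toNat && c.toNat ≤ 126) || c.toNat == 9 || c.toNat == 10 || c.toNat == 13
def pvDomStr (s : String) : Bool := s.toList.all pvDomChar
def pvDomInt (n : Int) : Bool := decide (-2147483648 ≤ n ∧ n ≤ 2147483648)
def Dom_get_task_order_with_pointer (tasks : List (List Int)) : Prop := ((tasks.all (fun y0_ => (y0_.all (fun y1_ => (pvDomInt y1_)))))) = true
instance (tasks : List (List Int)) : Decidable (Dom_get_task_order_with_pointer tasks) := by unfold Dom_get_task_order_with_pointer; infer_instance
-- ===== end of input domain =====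

-- B drops A's sort + pointer + heap entirely: it keeps the not-yet-admitted tasks
-- UNSORTED and each round filters them against the clock (ready tasks move to a
-- persistent `ready` pool, min-scanned with Python's `min`).  Objective: simpler —
-- no heap machinery, no pre-sort, no index pointer.  Neither version mutates its argument.

-- ===== PORT A =====

-- Python tuple comparison (p1, i1) < (p2, i2): lexicographic.
def pvLtA (x y : Int × Int) : Bool := x.1 < y.1 || (x.1 == y.1 && x.2 < y.2)

-- heapq model: the heap list kept fully sorted, so heappush = ordered insert and
-- heappop = take the head.  Observationally exact here: heapq only exposes minima.
def pvHeapPush : List (Int × Int) → Int × Int → List (Int × Int)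
  | [], x => [x]
  | y :: ys, x => if pvLtA x y then x :: y :: ys else y :: pvHeapPush ys x

-- sorted((e, p, idx) for idx, (e, p) in enumerate(tasks))
def pvIndexedA (tasks : List (List Int)) : List (Int × Int × Int) :=
  PySem.List.sorted2
    ((PySem.List.enumerate tasks).map
      (fun q => (((PySem.List.pyGet? q.2 0).getD 0), ((PySem.List.pyGet? q.2 1).getD 0), q.1)))
    (fun t => t.1) (fun t => t.2.1)

-- if not heap and current_time < indexed_tasks[i][0]: current_time = indexed_tasks[i][0]
def pvJumpA (idxT : List (Int × Int × Int)) (heap : List (Int × Int)) (i : Nat) (ct : Int) : Int :=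
  if heap.isEmpty then
    match idxT[i]? with
    | some t => if ct < t.1 then t.1 else ct
    | none => ct          -- unreachable: an empty heap forces i < length
  else ct

-- inner while: admit all tasks with enqueue_time <= current_time
def pvAdmitA (idxT : List (Int × Int × Int)) (i : Nat) (ct : Int)
    (heap : List (Int × Int)) : Nat × List (Int × Int) :=
  if h : i < idxT.length then
    if idxT[i].1 ≤ ct then pvAdmitA idxT (i + 1) ct (pvHeapPush heap (idxT[i].2.1, idxT[i].2.2))
    else (i, heap)
  else (i, heap)
termination_by idxT.length - i

-- outer while; fuel = number of tasks (exactly one heappop per iteration)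
def pvLoopA (idxT : List (Int × Int × Int)) : Nat → Nat → Int →
    List (Int × Int) → List Int → List Int
  | 0, _, _, _, acc => acc
  | fuel + 1, i, ct, heap, acc =>
    if i < idxT.length ∨ heap ≠ [] then
      match pvAdmitA idxT i (pvJumpA idxT heap i ct) heap with
      | (_, []) => acc      -- unreachable: heappop never sees an empty heap
      | (i2, m :: rest) =>
        pvLoopA idxT fuel i2 (pvJumpA idxT heap i ct + m.1) rest (acc ++ [m.2])
    else acc

def get_task_order_with_pointer (tasks : List (List Int)) : List Int :=
  let idxT := pvIndexedA tasks
  pvLoopA idxT idxT.length 0 0 [] []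

-- ===== PORT B =====

-- pending = [(e, p, i) for i, (e, p) in enumerate(tasks)]   (no sort)
def pvTasksB (tasks : List (List Int)) : List (Int × Int × Int) :=
  (PySem.List.enumerate tasks).map
    (fun q => (((PySem.List.pyGet? q.2 0).getD 0), ((PySem.List.pyGet? q.2 1).getD 0), q.1))

-- min(x[0] for x in pending): Python's min = running-min scan from the first element
def pvMinE : List (Int × Int × Int) → Int
  | [] => 0                 -- unreachable: guarded by `if not ready` under `while pending or ready`
  | x :: xs => xs.foldl (fun m y => min m y.1) x.1

-- Python tuple comparison c < best inside min(ready)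
def pvPairLt (x y : Int × Int) : Bool := decide (x.1 < y.1 ∨ (x.1 = y.1 ∧ x.2 < y.2))

-- best = min(ready): left-to-right scan keeping the lexicographically smaller pair
def pvMinScan (best : Int × Int) : List (Int × Int) → Int × Int
  | [] => best
  | c :: cs => pvMinScan (if pvPairLt c best then c else best) cs

-- if not ready: t = max(t, min(x[0] for x in pending))
def pvClock (t : Int) (pending : List (Int × Int × Int)) (ready : List (Int × Int)) : Int :=
  if ready.isEmpty then max t (pvMinE pending) else t

-- while pending or ready: admit by filtering the unsorted pending list, then pop the min
def pvLoopB : Nat → Int → List (Int × Int × Int) → List (Int × Int) → List Int → List Int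
  | 0, _, _, _, acc => acc
  | fuel + 1, t, pending, ready, acc =>
    if pending ≠ [] ∨ ready ≠ [] then
      match ready ++ (pending.filter (fun x => x.1 ≤ pvClock t pending ready)).map
          (fun x => (x.2.1, x.2.2)) with
      | [] => acc           -- unreachable: min(ready) never sees an empty list
      | b :: cs =>
        pvLoopB fuel (pvClock t pending ready + (pvMinScan b cs).1)
          (pending.filter (fun x => pvClock t pending ready < x.1))
          ((PySem.List.remove? (b :: cs) (pvMinScan b cs)).getD (b :: cs))
          (acc ++ [(pvMinScan b cs).2])
    else acc

def get_task_order_with_pointer_alt (tasks : List (List Int)) : List Int :=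
  pvLoopB tasks.length 0 (pvTasksB tasks) [] []

-- ===== PRECONDITION & SPEC =====
-- Pre_ excludes exactly the inputs where the unpacking 'idx, (e, p)' raises
-- ValueError in both Pythons: some inner list does not have exactly 2 elements.
def Pre_get_task_order_with_pointer (tasks : List (List Int)) : Prop :=
  ∀ l ∈ tasks, l.length = 2
instance (tasks : List (List Int)) : Decidable (Pre_get_task_order_with_pointer tasks) := by
  unfold Pre_get_task_order_with_pointer; infer_instance

def pvWitness_get_task_order_with_pointer : List (List Int) := [[0, 2], [1, 1], [1, 1]]

def Spec_get_task_order_with_pointer (tasks : List (List Int)) (out : List Int) : Prop := out = get_task_order_with_pointer_alt tasks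
instance (tasks : List (List Int)) (out : List Int) : Decidable (Spec_get_task_order_with_pointer tasks out) := by unfold Spec_get_task_order_with_pointer; infer_instance

-- ===== CLAIM (what is proved, stated in full; the proofs are below) =====
def Claim_equal_get_task_order_with_pointer : Prop := ∀ (tasks : List (List Int)), Dom_get_task_order_with_pointer tasks → Pre_get_task_order_with_pointer tasks → Spec_get_task_order_with_pointer tasks (get_task_order_with_pointer tasks)

-- ===== LEMMAS AND PROOFS =====

-- Prop-level "≤" for the lex order on (processing_time, idx)
def pvLe (x y : Int × Int) : Prop := x.1 < y.1 ∨ (x.1 = y.1 ∧ x.2 ≤ y.2)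

lemma pvLe_refl (x : Int × Int) : pvLe x x := by simp [pvLe]

lemma pvLe_trans {x y z : Int × Int} (h1 : pvLe x y) (h2 : pvLe y z) : pvLe x z := by
  unfold pvLe at *; omega

lemma pvLe_antisymm {x y : Int × Int} (h1 : pvLe x y) (h2 : pvLe y x) : x = y := by
  unfold pvLe at *
  obtain ⟨a, b⟩ := x; obtain ⟨c, d⟩ := y
  simp_all; omega

lemma pvLtA_le {x y : Int × Int} (h : pvLtA x y = true) : pvLe x y := by
  simp [pvLtA] at h; unfold pvLe; omega

lemma pvLtA_not_le {x y : Int × Int} (h : ¬ pvLtA x y = true) : pvLe y x := by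
  simp [pvLtA] at h; unfold pvLe; omega

lemma pvPairLt_le {x y : Int × Int} (h : pvPairLt x y = true) : pvLe x y := by
  simp [pvPairLt] at h; unfold pvLe; omega

lemma pvPairLt_not_le {x y : Int × Int} (h : ¬ pvPairLt x y = true) : pvLe y x := by
  simp [pvPairLt] at h; unfold pvLe; omega

lemma heapPush_perm (h : List (Int × Int)) (x : Int × Int) :
    (pvHeapPush h x).Perm (x :: h) := by
  induction h with
  | nil => simp [pvHeapPush]
  | cons y ys ih =>
    simp only [pvHeapPush]
    split
    · exact List.Perm.refl _
    · exact (ih.cons y).trans (List.Perm.swap x y ys)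

lemma heapPush_sorted {h : List (Int × Int)} (x : Int × Int)
    (hs : h.Pairwise pvLe) : (pvHeapPush h x).Pairwise pvLe := by
  induction h with
  | nil => simp [pvHeapPush]
  | cons y ys ih =>
    rcases List.pairwise_cons.mp hs with ⟨hy, hys⟩
    simp only [pvHeapPush]
    split
    · rename_i hlt
      refine List.pairwise_cons.mpr ⟨?_, hs⟩
      intro z hz
      rcases List.mem_cons.mp hz with rfl | hz
      · exact pvLtA_le hlt
      · exact pvLe_trans (pvLtA_le hlt) (hy _ hz)
    · rename_i hnlt
      refine List.pairwise_cons.mpr ⟨?_, ih hys⟩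
      intro z hz
      rcases List.mem_cons.mp ((heapPush_perm ys x).mem_iff.mp hz) with rfl | hz
      · exact pvLtA_not_le hnlt
      · exact hy _ hz

lemma minScan_min (a : Int × Int) (ts : List (Int × Int)) :
    (pvMinScan a ts ∈ a :: ts) ∧ (∀ z ∈ a :: ts, pvLe (pvMinScan a ts) z) := by
  induction ts generalizing a with
  | nil =>
    refine ⟨by simp [pvMinScan], ?_⟩
    intro z hz
    rcases List.mem_cons.mp hz with rfl | hz
    · exact pvLe_refl _
    · simp at hz
  | cons c cs ih =>
    simp only [pvMinScan]
    rcases ih (if pvPairLt c a then c else a) with ⟨hmem, hmin⟩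
    have h0 : pvLe (pvMinScan (if pvPairLt c a then c else a) cs) (if pvPairLt c a then c else a) :=
      hmin _ (by simp)
    have hle_a : pvLe (pvMinScan (if pvPairLt c a then c else a) cs) a := by
      by_cases hlt : pvPairLt c a = true
      · rw [if_pos hlt] at h0 ⊢; exact pvLe_trans h0 (pvPairLt_le hlt)
      · rw [if_neg hlt] at h0 ⊢; exact h0
    have hle_c : pvLe (pvMinScan (if pvPairLt c a then c else a) cs) c := by
      by_cases hlt : pvPairLt c a = true
      · rw [if_pos hlt] at h0 ⊢; exact h0
      · rw [if_neg hlt] at h0 ⊢; exact pvLe_trans h0 (pvPairLt_not_le hlt)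
    refine ⟨?_, ?_⟩
    · rcases List.mem_cons.mp hmem with h | h
      · rw [h]; by_cases hlt : pvPairLt c a = true
        · rw [if_pos hlt]; simp
        · rw [if_neg hlt]; simp
      · simp [h]
    · intro z hz
      rcases List.mem_cons.mp hz with rfl | hz
      · exact hle_a
      · rcases List.mem_cons.mp hz with rfl | hz
        · exact hle_c
        · exact hmin _ (by simp [hz])

-- popping: the head of the sorted heap equals B's scanned minimum
lemma pop_head {m : Int × Int} {rest : List (Int × Int)} {a : Int × Int}
    {ts : List (Int × Int)}
    (hp : (m :: rest).Perm (a :: ts)) (hs : (m :: rest).Pairwise pvLe) :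
    pvMinScan a ts = m := by
  rcases minScan_min a ts with ⟨hmem, hmin⟩
  have hm_min : ∀ z ∈ m :: rest, pvLe m z := by
    intro z hz
    rcases List.mem_cons.mp hz with rfl | hz
    · exact pvLe_refl _
    · exact (List.pairwise_cons.mp hs).1 _ hz
  have h1 : pvLe m (pvMinScan a ts) := hm_min _ (hp.mem_iff.mpr hmem)
  have h2 : pvLe (pvMinScan a ts) m := hmin _ (hp.mem_iff.mp (by simp))
  exact pvLe_antisymm h2 h1

-- `sorted(...)` is weakly increasing in the first key (enqueue time)
lemma insertBy_pairwise_fst (x : Int × Int × Int) (ys : List (Int × Int × Int))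
    (hs : ys.Pairwise (fun a b => a.1 ≤ b.1)) :
    (PySem.List.insertBy
      (fun a b => decide (a.1 < b.1) || (!decide (b.1 < a.1) && decide (a.2.1 < b.2.1)))
      x ys).Pairwise (fun a b => a.1 ≤ b.1) := by
  induction ys with
  | nil => simp [PySem.List.insertBy]
  | cons y ys ih =>
    rcases List.pairwise_cons.mp hs with ⟨hy, hys⟩
    simp only [PySem.List.insertBy]
    split
    · rename_i hlt
      refine List.pairwise_cons.mpr ⟨?_, hs⟩
      intro z hz
      simp at hlt
      rcases List.mem_cons.mp hz with rfl | hz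
      · omega
      · have := hy _ hz; omega
    · rename_i hnlt
      refine List.pairwise_cons.mpr ⟨?_, ih hys⟩
      intro z hz
      simp at hnlt
      rcases (PySem.List.insertBy_mem_iff _ _ _ _).mp hz with rfl | hz
      · omega
      · exact hy _ hz

lemma foldl_insertBy_pairwise_fst (xs acc : List (Int × Int × Int))
    (hs : acc.Pairwise (fun a b => a.1 ≤ b.1)) :
    (xs.foldl (fun acc x => PySem.List.insertBy
      (fun a b => decide (a.1 < b.1) || (!decide (b.1 < a.1) && decide (a.2.1 < b.2.1)))
      x acc) acc).Pairwise (fun a b => a.1 ≤ b.1) := by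
  induction xs generalizing acc with
  | nil => exact hs
  | cons x xs ih => exact ih _ (insertBy_pairwise_fst x acc hs)

lemma indexedA_pairwise_fst (tasks : List (List Int)) :
    (pvIndexedA tasks).Pairwise (fun a b => a.1 ≤ b.1) := by
  unfold pvIndexedA PySem.List.sorted2
  exact foldl_insertBy_pairwise_fst _ [] (by simp)

-- pvMinE on a nonempty list is the least first component
lemma minE_spec (x : Int × Int × Int) (xs : List (Int × Int × Int)) :
    (∃ y ∈ x :: xs, pvMinE (x :: xs) = y.1) ∧
    (∀ y ∈ x :: xs, pvMinE (x :: xs) ≤ y.1) := by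
  have he : pvMinE (x :: xs) = (xs.map (fun y => y.1)).foldl min x.1 := by
    simp [pvMinE, List.foldl_map]
  constructor
  · rcases PySem.List.foldl_min_mem (xs.map (fun y => y.1)) x.1 with h | h
    · exact ⟨x, by simp, by rw [he, h]⟩
    · rcases List.mem_map.mp h with ⟨y, hy, hv⟩
      exact ⟨y, by simp [hy], by rw [he, ← hv]⟩
  · intro y hy
    rcases List.mem_cons.mp hy with rfl | hy
    · rw [he]; exact (PySem.List.foldl_min_le _ _).1
    · rw [he]
      exact (PySem.List.foldl_min_le _ _).2 _ (List.mem_map_of_mem hy)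

-- the admit loop on the (e-sorted) suffix = the two filters on any permutation of it
lemma admitA_spec (idxT : List (Int × Int × Int)) :
    ∀ n i ct heap, idxT.length - i = n →
      (idxT.drop i).Pairwise (fun a b => a.1 ≤ b.1) →
      heap.Pairwise pvLe →
      ((pvAdmitA idxT i ct heap).2.Perm
          (heap ++ ((idxT.drop i).filter (fun x => x.1 ≤ ct)).map (fun x => (x.2.1, x.2.2))) ∧
        idxT.drop (pvAdmitA idxT i ct heap).1 = (idxT.drop i).filter (fun x => ct < x.1) ∧
        (pvAdmitA idxT i ct heap).2.Pairwise pvLe) := by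
  intro n
  induction n with
  | zero =>
    intro i ct heap hn hsuf hs
    have hge : ¬ i < idxT.length := by omega
    have hd : idxT.drop i = [] := List.drop_eq_nil_of_le (by omega)
    rw [pvAdmitA]
    simp only [hge, dite_false]
    rw [hd]
    exact ⟨by simp, by simp, hs⟩
  | succ n ih =>
    intro i ct heap hn hsuf hs
    by_cases hlt : i < idxT.length
    · have hd : idxT.drop i = idxT[i] :: idxT.drop (i + 1) := List.drop_eq_getElem_cons hlt
      rw [pvAdmitA]
      simp only [hlt, dite_true]
      by_cases hc : idxT[i].1 ≤ ct
      · rw [if_pos hc]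
        have hsuf' : (idxT.drop (i + 1)).Pairwise (fun a b => a.1 ≤ b.1) := by
          rw [hd] at hsuf; exact (List.pairwise_cons.mp hsuf).2
        rcases ih (i + 1) ct _ (by omega) hsuf' (heapPush_sorted _ hs) with ⟨hp, hi, hps⟩
        refine ⟨?_, ?_, hps⟩
        · refine hp.trans ?_
          rw [hd, List.filter_cons_of_pos (by simpa using hc), List.map_cons]
          exact ((heapPush_perm heap _).append_right _).trans List.perm_middle.symm
        · rw [hi, hd, List.filter_cons_of_neg (by simpa using hc)]
      · rw [if_neg hc]
        refine ⟨?_, ?_, hs⟩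
        · have hnil : (idxT.drop i).filter (fun x => decide (x.1 ≤ ct)) = [] := by
            rw [List.filter_eq_nil_iff]
            intro a ha
            rw [hd] at ha
            rw [hd] at hsuf
            rcases List.mem_cons.mp ha with rfl | ha
            · simpa using hc
            · have := (List.pairwise_cons.mp hsuf).1 _ ha
              simp; omega
          rw [hnil]
          simp only [List.map_nil, List.append_nil]
          exact List.Perm.refl _
        · have hall : (idxT.drop i).filter (fun x => decide (ct < x.1)) = idxT.drop i := by
            rw [List.filter_eq_self]
            intro a ha
            rw [hd] at ha
            rw [hd] at hsuf
            rcases List.mem_cons.mp ha with rfl | ha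
            · simp; omega
            · have := (List.pairwise_cons.mp hsuf).1 _ ha
              simp; omega
          rw [hall]
    · rw [pvAdmitA]
      have hd : idxT.drop i = [] := List.drop_eq_nil_of_le (by omega)
      simp only [hlt, dite_false]
      rw [hd]
      exact ⟨by simp, by simp, hs⟩

-- the clock update of one round agrees
lemma jump_eq (idxT : List (Int × Int × Int)) (heap : List (Int × Int))
    (pending : List (Int × Int × Int)) (ready : List (Int × Int)) (i : Nat) (ct : Int)
    (hpr : heap.Perm ready) (hpp : (idxT.drop i).Perm pending)
    (hsuf : (idxT.drop i).Pairwise (fun a b => a.1 ≤ b.1))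
    (hcond : i < idxT.length ∨ heap ≠ []) :
    pvJumpA idxT heap i ct = pvClock ct pending ready := by
  by_cases hh : heap = []
  · subst hh
    have hready : ready = [] := hpr.symm.eq_nil
    subst hready
    have hi : i < idxT.length := by tauto
    have hd : idxT.drop i = idxT[i] :: idxT.drop (i + 1) := List.drop_eq_getElem_cons hi
    rcases pending with _ | ⟨q, qs⟩
    · rw [hd] at hpp
      exact absurd hpp.eq_nil (List.cons_ne_nil _ _)
    · have hmin : pvMinE (q :: qs) = idxT[i].1 := by
        rcases minE_spec q qs with ⟨⟨y, hy, hv⟩, hlb⟩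
        have hy' : y ∈ idxT.drop i := hpp.mem_iff.mpr hy
        have h1 : idxT[i].1 ≤ y.1 := by
          rw [hd] at hy'
          rw [hd] at hsuf
          rcases List.mem_cons.mp hy' with rfl | hy'
          · exact le_refl _
          · exact (List.pairwise_cons.mp hsuf).1 _ hy'
        have h2 : pvMinE (q :: qs) ≤ idxT[i].1 :=
          hlb _ (hpp.mem_iff.mp (by rw [hd]; exact List.mem_cons_self ..))
        omega
      simp only [pvJumpA, pvClock, List.isEmpty_nil,
        List.getElem?_eq_getElem hi, hmin]
      split_ifs <;> omega
  · have hready : ready ≠ [] := fun h => hh (by subst h; exact hpr.eq_nil)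
    have h1 : heap.isEmpty = false := by simpa using hh
    have h2 : ready.isEmpty = false := by simpa using hready
    simp [pvJumpA, pvClock, h1, h2]

-- one-round-at-a-time correspondence of the two main loops
lemma loop_rel (idxT : List (Int × Int × Int))
    (hsort : idxT.Pairwise (fun a b => a.1 ≤ b.1)) :
    ∀ fuel i ct heap pending ready acc,
      heap.Perm ready → heap.Pairwise pvLe → (idxT.drop i).Perm pending →
      pvLoopA idxT fuel i ct heap acc = pvLoopB fuel ct pending ready acc := by
  intro fuel
  induction fuel with
  | zero => intro i ct heap pending ready acc _ _ _; rfl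
  | succ fuel ih =>
    intro i ct heap pending ready acc hpr hs hpp
    have hsuf : (idxT.drop i).Pairwise (fun a b => a.1 ≤ b.1) :=
      List.Pairwise.sublist (List.drop_sublist i idxT) hsort
    rw [pvLoopA, pvLoopB]
    by_cases hcond : i < idxT.length ∨ heap ≠ []
    · have hcond' : pending ≠ [] ∨ ready ≠ [] := by
        rcases hcond with h | h
        · left
          intro hnil
          subst hnil
          have := List.drop_eq_nil_iff.mp hpp.eq_nil
          omega
        · right
          intro hnil
          subst hnil
          exact h hpr.eq_nil
      rw [if_pos hcond, if_pos hcond']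
      rw [jump_eq idxT heap pending ready i ct hpr hpp hsuf hcond]
      rcases admitA_spec idxT (idxT.length - i) i (pvClock ct pending ready) heap rfl hsuf hs
        with ⟨hp, hi, hps⟩
      rcases hA : pvAdmitA idxT i (pvClock ct pending ready) heap with ⟨i2, heap2⟩
      rw [hA] at hp hi hps
      simp only at hp hi hps
      have hperm2 : heap2.Perm
          (ready ++ (pending.filter (fun x => x.1 ≤ pvClock ct pending ready)).map
            (fun x => (x.2.1, x.2.2))) := by
        refine hp.trans ?_
        exact hpr.append ((hpp.filter _).map _)
      rcases heap2 with _ | ⟨m, rest⟩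
      · have h0 : ready ++ (pending.filter (fun x => x.1 ≤ pvClock ct pending ready)).map
            (fun x => (x.2.1, x.2.2)) = [] := hperm2.symm.eq_nil
        rw [h0]
      · rcases hB : ready ++ (pending.filter (fun x => x.1 ≤ pvClock ct pending ready)).map
            (fun x => (x.2.1, x.2.2)) with _ | ⟨b, cs⟩
        · rw [hB] at hperm2
          exact absurd hperm2.eq_nil (by simp)
        · rw [hB] at hperm2
          have hbest : pvMinScan b cs = m := pop_head hperm2 hps
          have hmem : m ∈ b :: cs := hperm2.mem_iff.mp (by simp)
          simp only []
          rw [hbest, PySem.List.remove?_eq_some_erase _ _ hmem]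
          simp only [Option.getD_some]
          apply ih
          · have h1 : ((b :: cs).erase m).Perm ((m :: rest).erase m) := hperm2.symm.erase m
            simpa using h1.symm
          · exact (List.pairwise_cons.mp hps).2
          · rw [hi]
            exact hpp.filter _
    · have hcond' : ¬ (pending ≠ [] ∨ ready ≠ []) := by
        rcases not_or.mp hcond with ⟨h1, h2⟩
        rw [not_or, not_not, not_not]
        have h2' : heap = [] := not_not.mp h2
        refine ⟨?_, ?_⟩
        · have hd : idxT.drop i = [] := List.drop_eq_nil_of_le (by omega)
          rw [hd] at hpp
          exact hpp.symm.eq_nil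
        · rw [h2'] at hpr
          exact hpr.symm.eq_nil
      rw [if_neg hcond, if_neg hcond']

-- ===== VERDICT (by name: the statement is the Claim_ definition above) =====
theorem get_task_order_with_pointer_spec : Claim_equal_get_task_order_with_pointer := by
  intro tasks _ _
  unfold Spec_get_task_order_with_pointer
  unfold get_task_order_with_pointer get_task_order_with_pointer_alt
  have hperm0 : (pvIndexedA tasks).Perm (pvTasksB tasks) := by
    simpa [pvTasksB] using PySem.List.sorted2_perm
      ((PySem.List.enumerate tasks).map
        (fun q => (((PySem.List.pyGet? q.2 0).getD 0), ((PySem.List.pyGet? q.2 1).getD 0), q.1)))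
      (fun t => t.1) (fun t => t.2.1) false
  have hlen : (pvIndexedA tasks).length = tasks.length := by
    rw [hperm0.length_eq]
    simp [pvTasksB, PySem.List.length_enumerate]
  simp only [hlen]
  exact loop_rel _ (indexedA_pairwise_fst tasks) tasks.length 0 0 [] (pvTasksB tasks) [] []
    (List.Perm.refl _) (by simp) (by simpa using hperm0)
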